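-- pv_equiv track=rewrite | github.com/sakshmenon/Faulthunter-new-approach | Utils/dataframe_gen.py | cond_extract
-- ===== SOURCE A (Python) =====
-- def cond_extract(else_flag, raw_line):
--     p_c = 0
--     flag = 0
--     cond_flag = 0
--     branch_line = ''
--     for i in enumerate(raw_line):
--         if i[1] == '(':
--             if flag == 0:
--                 flag = 1
--             p_c+=1
--         elif i[1] == ')':
--             if flag == 1:
--                 if p_c == 1:
--                     cond_flag = 1
--             p_c -= 1
--         if cond_flag:
--             branch_line = (raw_line[else_flag:i[0]+1])
--             break
--     return branch_line
-- ===== SOURCE B (Python) =====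
-- def cond_extract(else_flag, raw_line):
--     # Pass 1: prefix-balance table; bal[i] = paren balance BEFORE raw_line[i].
--     bal = [0]
--     b = 0
--     for c in raw_line:
--         b += (c == '(') - (c == ')')
--         bal.append(b)
--     # Pass 2: first ')' whose balance-before is 1 closes the outermost '('.
--     for i, c in enumerate(raw_line):
--         if c == ')' and bal[i] == 1:
--             return raw_line[else_flag:i + 1]
--     return ''
-- ===== Notes on version B (the rewrite author's own statement) =====
-- stated objective: alternative
-- what changed: Replaces the single-pass state machine (p_c/flag/cond_flag accumulators with a break) by a two-pass table-then-scan: first materialize a prefix-balance table, then scan for the first ')' whose balance-before equals 1 (balance 1 already implies an open paren was seen, so no flag is needed).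
import Mathlib
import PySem

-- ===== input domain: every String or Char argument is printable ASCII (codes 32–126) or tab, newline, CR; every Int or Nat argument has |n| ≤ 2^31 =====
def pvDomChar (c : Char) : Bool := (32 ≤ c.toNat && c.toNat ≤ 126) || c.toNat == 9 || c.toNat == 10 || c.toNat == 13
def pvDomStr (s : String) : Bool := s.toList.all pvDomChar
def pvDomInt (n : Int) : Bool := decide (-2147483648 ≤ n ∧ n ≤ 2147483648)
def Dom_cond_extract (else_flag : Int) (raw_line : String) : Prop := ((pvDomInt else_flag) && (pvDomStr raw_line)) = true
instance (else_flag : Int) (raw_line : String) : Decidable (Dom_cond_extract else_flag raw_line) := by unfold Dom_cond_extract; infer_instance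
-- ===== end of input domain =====

-- B replaces A's single-pass p_c/flag/cond_flag state machine by a two-pass
-- prefix-balance-table-then-scan decomposition (alternative, same cost).

-- ===== PORT A =====
-- A's for-loop over enumerate(raw_line) carrying p_c and flag; the break on
-- cond_flag becomes returning the slice directly.
def condAloop (else_flag : Int) (raw_line : String) (p_c flag : Int) :
    List (Int × Char) → String
  | [] => ""
  | (idx, c) :: rest =>
    if c = '(' then
      condAloop else_flag raw_line (p_c + 1) (if flag = 0 then 1 else flag) rest
    else if c = ')' then
      if flag = 1 ∧ p_c = 1 then
        PySem.Str.slice raw_line (some else_flag) (some (idx + 1))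
      else
        condAloop else_flag raw_line (p_c - 1) flag rest
    else
      condAloop else_flag raw_line p_c flag rest

def cond_extract (else_flag : Int) (raw_line : String) : String :=
  condAloop else_flag raw_line 0 0 (PySem.List.enumerate raw_line.toList 0)

-- ===== PORT B =====
-- Source B pass 1: bal = [0]; for c: b += (c=='(')-(c==')'); bal.append(b)
def condBbal (bal : List Int) (b : Int) : List Char → List Int
  | [] => bal
  | c :: rest =>
    let b' := b + (if c = '(' then 1 else 0) - (if c = ')' then 1 else 0)
    condBbal (bal ++ [b']) b' rest

-- Source B pass 2: first ')' with bal[i] == 1 (bal[i] is always in range here)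
def condBscan (else_flag : Int) (raw_line : String) (bal : List Int) :
    List (Int × Char) → String
  | [] => ""
  | (i, c) :: rest =>
    if c = ')' ∧ PySem.List.pyGet? bal i = some 1 then
      PySem.Str.slice raw_line (some else_flag) (some (i + 1))
    else
      condBscan else_flag raw_line bal rest

def cond_extract_alt (else_flag : Int) (raw_line : String) : String :=
  condBscan else_flag raw_line (condBbal [0] 0 raw_line.toList)
    (PySem.List.enumerate raw_line.toList 0)

-- ===== PRECONDITION & SPEC =====
def Spec_cond_extract (else_flag : Int) (raw_line : String) (out : String) : Prop := out = cond_extract_alt else_flag raw_line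
instance (else_flag : Int) (raw_line : String) (out : String) : Decidable (Spec_cond_extract else_flag raw_line out) := by unfold Spec_cond_extract; infer_instance

-- ===== CLAIM (what is proved, stated in full; the proofs are below) =====
def Claim_equal_cond_extract : Prop := ∀ (else_flag : Int) (raw_line : String), Dom_cond_extract else_flag raw_line → Spec_cond_extract else_flag raw_line (cond_extract else_flag raw_line)

-- ===== LEMMAS AND PROOFS =====

def pvStep (b : Int) (c : Char) : Int :=
  b + (if c = '(' then 1 else 0) - (if c = ')' then 1 else 0)

def pvScan (b : Int) : List Char → List Int
  | [] => []
  | c :: rest => pvStep b c :: pvScan (pvStep b c) rest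

lemma condBbal_eq (cs : List Char) : ∀ (bal : List Int) (b : Int),
    condBbal bal b cs = bal ++ pvScan b cs := by
  induction cs with
  | nil => intro bal b; simp [condBbal, pvScan]
  | cons c rest ih =>
    intro bal b
    simp [condBbal, pvScan, pvStep, ih, List.append_assoc]

lemma scan_get (pre : List Char) : ∀ (suf : List Char) (b : Int),
    (b :: pvScan b (pre ++ suf))[pre.length]? = some (pre.foldl pvStep b) := by
  induction pre with
  | nil => intro suf b; simp
  | cons c pre' ih =>
    intro suf b
    simpa [pvScan, List.foldl_cons] using ih suf (pvStep b c)

lemma no_open_le (l : List Char) : ∀ (b : Int), '(' ∉ l → l.foldl pvStep b ≤ b := by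
  induction l with
  | nil => intro b _; simp
  | cons c rest ih =>
    intro b h
    simp only [List.mem_cons, not_or] at h
    have hne : ¬ c = '(' := fun e => h.1 e.symm
    have h1 : pvStep b c ≤ b := by simp [pvStep, hne]; split <;> omega
    have h2 := ih (pvStep b c) h.2
    calc (c :: rest).foldl pvStep b = rest.foldl pvStep (pvStep b c) := by simp
      _ ≤ pvStep b c := h2
      _ ≤ b := h1

lemma main_loop (ef : Int) (s : String) :
    ∀ (suf pre : List Char) (p flag : Int), s.toList = pre ++ suf →
    p = pre.foldl pvStep 0 → flag = (if '(' ∈ pre then 1 else 0) →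
    condAloop ef s p flag (PySem.List.enumerate suf (pre.length : Int)) =
    condBscan ef s (condBbal [0] 0 s.toList)
        (PySem.List.enumerate suf (pre.length : Int)) := by
  intro suf
  induction suf with
  | nil =>
    intro pre p flag _ _ _
    rw [PySem.List.enumerate_nil]
    rfl
  | cons c rest ih =>
    intro pre p flag h hp hflag
    rw [PySem.List.enumerate_cons, condAloop, condBscan]
    have hget : PySem.List.pyGet? (condBbal [0] 0 s.toList) (pre.length : Int)
        = some (pre.foldl pvStep 0) := by
      rw [condBbal_eq, h]
      simpa [PySem.List.pyGet?_natCast] using scan_get pre (c :: rest) 0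
    have hlen : (pre.length : Int) + 1 = ((pre ++ [c]).length : Int) := by
      simp
    by_cases hc1 : c = '('
    · subst hc1
      have hB : ¬ (('(' : Char) = ')' ∧ PySem.List.pyGet? (condBbal [0] 0 s.toList) (pre.length : Int) = some 1) :=
        fun hx => absurd hx.1 (by decide)
      rw [if_pos rfl, if_neg hB, hlen]
      exact ih (pre ++ ['(']) _ _ (by simpa using h)
        (by subst hp; simp [List.foldl_append, pvStep])
        (by by_cases hm : '(' ∈ pre <;> simp [hflag, hm])
    · by_cases hc2 : c = ')'
      · subst hc2
        rw [if_neg hc1, if_pos rfl, hget]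
        by_cases hcond : pre.foldl pvStep 0 = 1
        · have hm : '(' ∈ pre := by
            by_contra hm
            have := no_open_le pre 0 hm
            omega
          have hA : flag = 1 ∧ p = 1 := ⟨by simp [hflag, hm], hp.trans hcond⟩
          have hB : (')' : Char) = ')' ∧ (some (pre.foldl pvStep 0) : Option Int) = some 1 :=
            ⟨rfl, by rw [hcond]⟩
          rw [if_pos hA, if_pos hB]
        · have hA : ¬ (flag = 1 ∧ p = 1) := fun hx => hcond (hp.symm.trans hx.2)
          have hB : ¬ ((')' : Char) = ')' ∧ (some (pre.foldl pvStep 0) : Option Int) = some 1) :=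
            fun hx => hcond (Option.some.inj hx.2)
          rw [if_neg hA, if_neg hB, hlen]
          exact ih (pre ++ [')']) _ _ (by simpa using h)
            (by subst hp; simp [List.foldl_append, pvStep])
            (by simp [hflag])
      · have hne : ¬ ('(' : Char) = c := fun e => hc1 e.symm
        have hB : ¬ (c = ')' ∧ PySem.List.pyGet? (condBbal [0] 0 s.toList) (pre.length : Int) = some 1) :=
          fun hx => hc2 hx.1
        rw [if_neg hc1, if_neg hc2, if_neg hB, hlen]
        exact ih (pre ++ [c]) _ _ (by simpa using h)
          (by subst hp; simp [List.foldl_append, pvStep, hc1, hc2])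
          (by simp [hflag, hne])

-- ===== VERDICT (by name: the statement is the Claim_ definition above) =====
theorem cond_extract_spec : Claim_equal_cond_extract := by
  intro ef s _
  unfold Spec_cond_extract cond_extract cond_extract_alt
  have := main_loop ef s s.toList [] 0 0 (by simp) (by simp) (by simp)
  simpa using this
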